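-- pv_equiv track=rewrite | github.com/stablecaps/helpohelpo | helpo/hstrops.py | get_multiblocks_between_tags
-- ===== SOURCE A (Python) =====
-- def get_multiblocks_between_tags(filetext, start_tag=":::", end_tag=":::"):
--     """
--     Extracts blocks of text between specified start and end tags.
--
--     Args:
--         filetext (str): The text to search within.
--         start_tag (str, optional): The tag marking the start of the text to extract. Defaults to ":::".
--         end_tag (str, optional): The tag marking the end of the text to extract. Defaults to ":::".
--
--     Returns:
--         list: A list of blocks (each block is a list of lines) between the start and end tags.
--
--     Example:
--         >>> text = "Hello\n:::\nWorld\n:::\nGoodbye"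
--         >>> get_multiblocks_between_tags(text)
--         [[':::', 'World', ':::']]
--     """
--     block_holder = []
--     inRecordingMode = False
--     for line in filetext.split("\n"):
--         if not inRecordingMode:
--             if start_tag in line:
--                 inRecordingMode = True
--                 line_holder = []
--                 line_holder.append(line)
--         elif end_tag in line:
--             inRecordingMode = False
--             line_holder.append(line)
--             block_holder.append(line_holder)
--         else:
--             line_holder.append(line)
--     return block_holder
-- ===== SOURCE B (Python) =====
-- def get_multiblocks_between_tags(filetext, start_tag=":::", end_tag=":::"):
--     lines = filetext.split("\n")
--     n = len(lines)
--     blocks = []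
--     i = 0
--     while i < n:
--         if start_tag in lines[i]:
--             j = i + 1
--             while j < n and end_tag not in lines[j]:
--                 j += 1
--             if j == n:
--                 break  # unclosed trailing block is dropped
--             blocks.append(lines[i:j + 1])
--             i = j + 1
--         else:
--             i += 1
--     return blocks
-- ===== Notes on version B (the rewrite author's own statement) =====
-- stated objective: alternative
-- what changed: Replaces A's boolean-flag state machine (one fold carrying inRecordingMode and a growing line_holder) with an index-based scan: an outer loop finds a start line, an inner loop finds the matching end line, and the block is taken as a single slice lines[i:j+1].
import Mathlib
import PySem

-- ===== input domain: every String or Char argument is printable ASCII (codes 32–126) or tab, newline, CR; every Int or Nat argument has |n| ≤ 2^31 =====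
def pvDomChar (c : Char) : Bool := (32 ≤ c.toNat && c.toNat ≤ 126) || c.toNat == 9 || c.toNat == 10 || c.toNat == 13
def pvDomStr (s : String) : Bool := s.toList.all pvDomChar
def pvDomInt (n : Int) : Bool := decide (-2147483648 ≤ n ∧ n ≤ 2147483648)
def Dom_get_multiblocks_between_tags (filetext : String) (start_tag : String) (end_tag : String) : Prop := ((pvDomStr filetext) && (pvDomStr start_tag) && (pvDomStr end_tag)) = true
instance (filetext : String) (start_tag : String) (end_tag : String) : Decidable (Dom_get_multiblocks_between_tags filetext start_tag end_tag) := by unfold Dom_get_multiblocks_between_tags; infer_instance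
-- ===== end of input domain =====

-- B replaces A's boolean-flag fold with an index-based outer/inner scan taking each block as one slice; same cost, different decomposition.

-- ===== PORT A =====
-- A's loop: state = (block_holder, inRecordingMode, line_holder)
def aStep (start_tag end_tag : String) (st : List (List String) × Bool × List String)
    (line : String) : List (List String) × Bool × List String :=
  if st.2.1 = false then
    if PySem.Str.isIn start_tag line then (st.1, true, [line]) else st
  else if PySem.Str.isIn end_tag line then (st.1 ++ [st.2.2 ++ [line]], false, [])
  else (st.1, true, st.2.2 ++ [line])

def get_multiblocks_between_tags (filetext : String) (start_tag : String) (end_tag : String) : List (List String) :=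
  ((((PySem.Str.split? filetext "\n").getD [])).foldl (aStep start_tag end_tag) ([], false, [])).1

-- ===== PORT B =====
-- Source B's inner while loop: advance j while j < n and end_tag not in lines[j]; return final j
def bInner (lines : List String) (end_tag : String) (n j : Nat) : Nat :=
  if j < n then
    if PySem.Str.isIn end_tag (lines.getD j "") then j else bInner lines end_tag n (j + 1)
  else j
termination_by n - j

theorem bInner_ge (lines : List String) (end_tag : String) (n j : Nat) :
    j ≤ bInner lines end_tag n j := by
  unfold bInner
  split
  · split
    · exact le_refl _
    · exact le_trans (Nat.le_succ j) (bInner_ge lines end_tag n (j + 1))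
  · exact le_refl _
termination_by n - j

-- Source B's outer while loop over index i
def bOuter (lines : List String) (start_tag end_tag : String) (n i : Nat) : List (List String) :=
  if h : i < n then
    if PySem.Str.isIn start_tag (lines.getD i "") then
      let j := bInner lines end_tag n (i + 1)
      if j = n then []
      else PySem.List.slice lines (some (i : Int)) (some ((j : Int) + 1)) ::
           bOuter lines start_tag end_tag n (j + 1)
    else bOuter lines start_tag end_tag n (i + 1)
  else []
termination_by n - i
decreasing_by
  · have := bInner_ge lines end_tag n (i + 1); omega
  · omega

def get_multiblocks_between_tags_alt (filetext : String) (start_tag : String) (end_tag : String) : List (List String) :=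
  let lines := ((PySem.Str.split? filetext "\n").getD [])
  bOuter lines start_tag end_tag lines.length 0

-- ===== PRECONDITION & SPEC =====
def Spec_get_multiblocks_between_tags (filetext : String) (start_tag : String) (end_tag : String) (out : List (List String)) : Prop := out = get_multiblocks_between_tags_alt filetext start_tag end_tag
instance (filetext : String) (start_tag : String) (end_tag : String) (out : List (List String)) : Decidable (Spec_get_multiblocks_between_tags filetext start_tag end_tag out) := by unfold Spec_get_multiblocks_between_tags; infer_instance

-- ===== CLAIM (what is proved, stated in full; the proofs are below) =====
def Claim_equal_get_multiblocks_between_tags : Prop := ∀ (filetext : String) (start_tag : String) (end_tag : String), Dom_get_multiblocks_between_tags filetext start_tag end_tag → Spec_get_multiblocks_between_tags filetext start_tag end_tag (get_multiblocks_between_tags filetext start_tag end_tag)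

-- ===== LEMMAS AND PROOFS =====

theorem bInner_le_n (lines : List String) (et : String) (j : Nat) (hj : j ≤ lines.length) :
    bInner lines et lines.length j ≤ lines.length := by
  rw [bInner]
  split
  · split
    · omega
    · exact bInner_le_n lines et (j + 1) (by omega)
  · omega
termination_by lines.length - j

-- While recording with accumulated block `cur`, A's fold over the remaining lines from j
-- either closes the block at index bInner ... j (then continues not-recording after it),
-- or never closes it and the block is dropped.
theorem inner_lem (st et : String) (lines : List String) (j : Nat)
    (blocks : List (List String)) (cur : List String) (hj : j ≤ lines.length) :
    ((lines.drop j).foldl (aStep st et) (blocks, true, cur)).1 =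
      (if bInner lines et lines.length j = lines.length then blocks
       else ((lines.drop (bInner lines et lines.length j + 1)).foldl (aStep st et)
          (blocks ++ [cur ++ (lines.drop j).take (bInner lines et lines.length j + 1 - j)],
           false, [])).1) := by
  by_cases h : j < lines.length
  · have hd : lines.drop j = lines[j] :: lines.drop (j + 1) := List.drop_eq_getElem_cons h
    have hgd : lines.getD j "" = lines[j] := List.getD_eq_getElem lines "" h
    by_cases e : PySem.Chars.isIn et.toList lines[j].toList = true
    · -- end_tag found at j: the block closes here
      have hb : bInner lines et lines.length j = j := by
        rw [bInner]; simp [h, e]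
      rw [hd, hb]
      have hne : ¬ j = lines.length := by omega
      simp only [hne, if_false, List.foldl_cons]
      have hstep : aStep st et (blocks, true, cur) lines[j]
          = (blocks ++ [cur ++ [lines[j]]], false, []) := by simp [aStep, e]
      rw [hstep]
      have h1 : j + 1 - j = 1 := by omega
      have ht : (lines[j] :: lines.drop (j + 1)).take (j + 1 - j) = [lines[j]] := by
        rw [h1, List.take_succ_cons, List.take_zero]
      rw [ht]
    · -- end_tag not at j: keep recording
      rw [Bool.not_eq_true] at e
      have hb : bInner lines et lines.length j = bInner lines et lines.length (j + 1) := by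
        rw [bInner]; simp [h, e]
      have hge : j + 1 ≤ bInner lines et lines.length (j + 1) := bInner_ge _ _ _ _
      have ih := inner_lem st et lines (j + 1) blocks (cur ++ [lines[j]]) (by omega)
      rw [hd, List.foldl_cons]
      have hstep : aStep st et (blocks, true, cur) lines[j] = (blocks, true, cur ++ [lines[j]]) := by
        simp [aStep, e]
      rw [hstep, ih, hb]
      by_cases hn : bInner lines et lines.length (j + 1) = lines.length
      · simp [hn]
      · simp only [hn, if_false]
        have h2 : bInner lines et lines.length (j + 1) + 1 - j
            = (bInner lines et lines.length (j + 1) + 1 - (j + 1)) + 1 := by omega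
        rw [h2, List.take_succ_cons]
        simp
  · have hj' : j = lines.length := by omega
    have hdn : lines.drop j = [] := List.drop_eq_nil_of_le (by omega)
    have hb : bInner lines et lines.length j = j := by
      rw [bInner]; simp [h]
    rw [hdn, hb]
    simp [hj']
termination_by lines.length - j

-- Not recording from index i onwards: A's fold appends exactly B's bOuter blocks.
theorem main_lem (st et : String) (lines : List String) (i : Nat)
    (blocks : List (List String)) (hi : i ≤ lines.length) :
    ((lines.drop i).foldl (aStep st et) (blocks, false, [])).1
      = blocks ++ bOuter lines st et lines.length i := by
  by_cases h : i < lines.length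
  · have hd : lines.drop i = lines[i] :: lines.drop (i + 1) := List.drop_eq_getElem_cons h
    have hgd : lines.getD i "" = lines[i] := List.getD_eq_getElem lines "" h
    by_cases s : PySem.Chars.isIn st.toList lines[i].toList = true
    · -- start_tag found at i: start a block
      rw [hd, List.foldl_cons]
      have hstep : aStep st et (blocks, false, ([] : List String)) lines[i]
          = (blocks, true, [lines[i]]) := by simp [aStep, s]
      rw [hstep]
      rw [inner_lem st et lines (i + 1) blocks [lines[i]] (by omega)]
      have hge : i + 1 ≤ bInner lines et lines.length (i + 1) := bInner_ge _ _ _ _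
      conv_rhs => rw [bOuter]
      simp only [h, dif_pos, hgd, s, PySem.Str.isIn_eq, if_pos]
      by_cases hn : bInner lines et lines.length (i + 1) = lines.length
      · simp [hn]
      · simp only [hn, if_false]
        rw [main_lem st et lines (bInner lines et lines.length (i + 1) + 1)
          (blocks ++ [[lines[i]] ++ (lines.drop (i + 1)).take (bInner lines et lines.length (i + 1) + 1 - (i + 1))])
          (by have := bInner_le_n lines et (i + 1) (by omega); omega)]
        have hslice : PySem.List.slice lines (some (i : Int))
              (some ((bInner lines et lines.length (i + 1) : Int) + 1))
            = [lines[i]] ++ (lines.drop (i + 1)).take (bInner lines et lines.length (i + 1) + 1 - (i + 1)) := by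
          have hcast : ((bInner lines et lines.length (i + 1) : Int) + 1)
              = ((bInner lines et lines.length (i + 1) + 1 : Nat) : Int) := by push_cast; ring
          rw [hcast, PySem.List.slice_natCast, hd]
          have h2 : bInner lines et lines.length (i + 1) + 1 - i
              = (bInner lines et lines.length (i + 1) + 1 - (i + 1)) + 1 := by omega
          rw [h2, List.take_succ_cons]
          simp
        rw [hslice]
        simp
    · -- no start_tag at i: skip the line
      rw [Bool.not_eq_true] at s
      rw [hd, List.foldl_cons]
      have hstep : aStep st et (blocks, false, ([] : List String)) lines[i]
          = (blocks, false, []) := by simp [aStep, s]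
      rw [hstep]
      rw [main_lem st et lines (i + 1) blocks (by omega)]
      conv_rhs => rw [bOuter]
      simp [h, s]
  · have hdn : lines.drop i = [] := List.drop_eq_nil_of_le (by omega)
    rw [hdn]
    conv_rhs => rw [bOuter]
    simp [h]
termination_by lines.length - i
decreasing_by
  · have := bInner_ge lines et lines.length (i + 1); omega
  · omega

-- ===== VERDICT (by name: the statement is the Claim_ definition above) =====
theorem get_multiblocks_between_tags_spec : Claim_equal_get_multiblocks_between_tags := by
  intro filetext st et _
  unfold Spec_get_multiblocks_between_tags
  unfold get_multiblocks_between_tags get_multiblocks_between_tags_alt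
  have := main_lem st et ((PySem.Str.split? filetext "\n").getD []) 0 [] (by omega)
  simpa using this
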